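-- pv_equiv track=rewrite | github.com/Jerenyaoyelu/Python-Programming---COMP9021 | Assignment/1/Q2/superpower.py | get_first_and_last_minus_index
-- ===== SOURCE A (Python) =====
-- def get_first_and_last_minus_index(l):
--     first_index, last_index,count=0,0,0
--     for i in range(len(l)):
--         if l[i]<0:
--             first_index=i
--             break
--     for i in range(len(l)):
--         if l[i]<0:
--             last_index=i
--             count +=1
--     return first_index, last_index,count
-- ===== SOURCE B (Python) =====
-- def get_first_and_last_minus_index(l):
--     negs = [i for i, x in enumerate(l) if x < 0]
--     if negs:
--         return negs[0], negs[-1], len(negs)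
--     return 0, 0, 0
-- ===== Notes on version B (the rewrite author's own statement) =====
-- stated objective: simpler
-- what changed: Replaces two positional scans (one with early break, one with a last-index/counter) by a single build of the list of negative indices, from which first/last/count are read off as endpoints and length.
import Mathlib
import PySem

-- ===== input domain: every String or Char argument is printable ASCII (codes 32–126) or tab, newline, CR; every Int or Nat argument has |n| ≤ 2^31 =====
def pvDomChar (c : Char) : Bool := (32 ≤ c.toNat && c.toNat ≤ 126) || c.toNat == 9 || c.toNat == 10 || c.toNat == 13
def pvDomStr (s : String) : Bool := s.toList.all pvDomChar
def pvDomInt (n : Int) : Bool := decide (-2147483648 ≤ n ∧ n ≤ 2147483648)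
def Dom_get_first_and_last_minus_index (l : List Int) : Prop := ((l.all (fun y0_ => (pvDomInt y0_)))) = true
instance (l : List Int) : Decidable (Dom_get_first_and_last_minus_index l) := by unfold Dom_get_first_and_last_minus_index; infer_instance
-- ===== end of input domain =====

-- B replaces A's two positional scans by building the list of negative indices once
-- and reading off its endpoints and length (objective: simpler).

-- ===== PORT A =====
-- first loop of A: walk indices in order, stop (break) at the first negative element
def pvA_firstLoop (l : List Int) (i : Int) : Int :=
  match l with
  | [] => 0
  | x :: xs => if x < 0 then i else pvA_firstLoop xs (i + 1)

-- second loop of A: update last_index and count at every negative element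
def pvA_secondLoop (l : List Int) (i : Int) (last count : Int) : Int × Int :=
  match l with
  | [] => (last, count)
  | x :: xs =>
    if x < 0 then pvA_secondLoop xs (i + 1) i (count + 1)
    else pvA_secondLoop xs (i + 1) last count

def get_first_and_last_minus_index (l : List Int) : Int × Int × Int :=
  let first_index := pvA_firstLoop l 0
  let lc := pvA_secondLoop l 0 0 0
  (first_index, lc.1, lc.2)

-- ===== PORT B =====
def get_first_and_last_minus_index_alt (l : List Int) : Int × Int × Int :=
  let negs := ((PySem.List.enumerate l).filter (fun p => p.2 < 0)).map (fun p => p.1)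
  match negs with
  | [] => (0, 0, 0)
  | h :: t => (h, (h :: t).getLast (by simp), (h :: t).length)

-- ===== PRECONDITION & SPEC =====
def Spec_get_first_and_last_minus_index (l : List Int) (out : Int × Int × Int) : Prop := out = get_first_and_last_minus_index_alt l
instance (l : List Int) (out : Int × Int × Int) : Decidable (Spec_get_first_and_last_minus_index l out) := by unfold Spec_get_first_and_last_minus_index; infer_instance

-- ===== CLAIM =====
def Claim_equal_get_first_and_last_minus_index : Prop := ∀ (l : List Int), Dom_get_first_and_last_minus_index l → Spec_get_first_and_last_minus_index l (get_first_and_last_minus_index l)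

-- ===== LEMMAS AND PROOFS =====
-- the list of indices (starting at i) of negative elements of l
def pvNegs (l : List Int) (i : Int) : List Int :=
  match l with
  | [] => []
  | x :: xs => if x < 0 then i :: pvNegs xs (i + 1) else pvNegs xs (i + 1)

theorem pvNegs_eq (l : List Int) (i : Int) :
    ((PySem.List.enumerate l i).filter (fun p => p.2 < 0)).map (fun p => p.1) = pvNegs l i := by
  induction l generalizing i with
  | nil => simp [pvNegs, PySem.List.enumerate_nil]
  | cons x xs ih =>
    simp only [PySem.List.enumerate_cons, pvNegs, List.filter_cons]
    by_cases h : x < 0 <;> simp [h, ih]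

theorem pvA_firstLoop_eq (l : List Int) (i : Int) :
    pvA_firstLoop l i = (pvNegs l i).headD 0 := by
  induction l generalizing i with
  | nil => simp [pvA_firstLoop, pvNegs]
  | cons x xs ih =>
    simp only [pvA_firstLoop, pvNegs]
    by_cases h : x < 0 <;> simp [h, ih]

theorem pvA_secondLoop_eq (l : List Int) (i last count : Int) :
    pvA_secondLoop l i last count =
      ((pvNegs l i).getLastD last, count + (pvNegs l i).length) := by
  induction l generalizing i last count with
  | nil => simp [pvA_secondLoop, pvNegs]
  | cons x xs ih =>
    simp only [pvA_secondLoop, pvNegs]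
    by_cases h : x < 0
    · simp only [h, if_pos]
      rw [ih, Prod.mk.injEq]
      refine ⟨by rw [List.getLastD_cons], by simp; ring⟩
    · simp [h, ih]

theorem pv_main (l : List Int) :
    get_first_and_last_minus_index l = get_first_and_last_minus_index_alt l := by
  unfold get_first_and_last_minus_index get_first_and_last_minus_index_alt
  rw [pvNegs_eq, pvA_firstLoop_eq, pvA_secondLoop_eq]
  cases h : pvNegs l 0 with
  | nil => simp
  | cons a t =>
    simp only [List.getLast_eq_getLastD, List.getLastD_cons]
    simp [List.getLastD_eq_getLast?]

-- ===== VERDICT =====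
theorem get_first_and_last_minus_index_spec : Claim_equal_get_first_and_last_minus_index := by
  intro l _
  unfold Spec_get_first_and_last_minus_index
  exact pv_main l
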